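-- pv_equiv track=rewrite | github.com/JangoBoogaloo/LeetCodeExcercise | leetcodePython/Stack/stack_581.py | _getMinimumUnsortedLeftIndex
-- ===== SOURCE A (Python) =====
-- from typing import List
--
-- def _getMinimumUnsortedLeftIndex(nums: List[int]) -> int:
--     breakMonotonicIndex = len(nums)
--     for i in range(1, len(nums)):
--         if nums[i] < nums[i-1]:
--             breakMonotonicIndex = i
--             break
--
--     unsortedMin = float("inf")
--     for i in range(breakMonotonicIndex, len(nums)):
--         unsortedMin = min(unsortedMin, nums[i])
--
--     for left in range(len(nums)):
--         if unsortedMin < nums[left]: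
--             return left
--     return len(nums)
-- ===== SOURCE B (Python) =====
-- from typing import List
--
-- def _getMinimumUnsortedLeftIndex(nums: List[int]) -> int:
--     min_so_far = float("inf")
--     left = len(nums)
--     for i in range(len(nums) - 1, -1, -1):
--         if nums[i] > min_so_far:
--             left = i
--         if nums[i] < min_so_far:
--             min_so_far = nums[i]
--     return left
-- ===== Notes on version B (the rewrite author's own statement) =====
-- stated objective: alternative
-- what changed: Replaced A's three forward passes (find first monotonic break, compute the suffix minimum from there, forward-scan for the first element above it) with a single right-to-left scan that maintains the running suffix minimum and records the leftmost index whose value exceeds the minimum of everything to its right.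
import Mathlib
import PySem

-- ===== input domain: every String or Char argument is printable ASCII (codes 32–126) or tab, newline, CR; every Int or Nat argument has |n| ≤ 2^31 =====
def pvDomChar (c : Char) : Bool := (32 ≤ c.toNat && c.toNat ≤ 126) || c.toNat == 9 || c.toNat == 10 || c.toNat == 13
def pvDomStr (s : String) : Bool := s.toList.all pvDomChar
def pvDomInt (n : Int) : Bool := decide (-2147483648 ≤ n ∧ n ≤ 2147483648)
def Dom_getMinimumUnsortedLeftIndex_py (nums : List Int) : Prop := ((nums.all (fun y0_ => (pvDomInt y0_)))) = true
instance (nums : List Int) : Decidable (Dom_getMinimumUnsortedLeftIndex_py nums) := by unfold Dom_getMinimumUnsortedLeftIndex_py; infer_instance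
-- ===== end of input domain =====

-- B replaces A's three forward passes (break detection, suffix minimum, forward search)
-- by a single right-to-left scan maintaining the suffix minimum incrementally; objective: alternative/simpler.

-- ===== PORT A =====
-- first loop of A: first i in [1, n) with nums[i] < nums[i-1], else len(nums)
def fbA (nums : List Int) (i : Nat) : Nat :=
  if _h : i < nums.length then
    if nums.getD i 0 < nums.getD (i - 1) 0 then i else fbA nums (i + 1)
  else nums.length
termination_by nums.length - i

-- second loop of A: unsortedMin over [breakMonotonicIndex, n); float('inf') modeled as none
def smA (nums : List Int) (i : Nat) (acc : Option Int) : Option Int :=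
  if _h : i < nums.length then
    smA nums (i + 1)
      (some (match acc with
             | none => nums.getD i 0
             | some m => min m (nums.getD i 0)))
  else acc
termination_by nums.length - i

-- third loop of A: first left with unsortedMin < nums[left], else len(nums)
def flA (nums : List Int) (left : Nat) (m : Option Int) : Nat :=
  if _h : left < nums.length then
    if (match m with
        | none => false
        | some v => decide (v < nums.getD left 0)) then left
    else flA nums (left + 1) m
  else nums.length
termination_by nums.length - left

def getMinimumUnsortedLeftIndex_py (nums : List Int) : Int :=
  ((flA nums 0 (smA nums (fbA nums 1) none) : Nat) : Int)

-- ===== PORT B =====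
-- B's single reverse loop: first Nat argument is (index being processed) + 1
def loopB (nums : List Int) : Nat → Option Int → Nat → Nat
  | 0, _, left => left
  | i + 1, msf, left =>
    let x := nums.getD i 0
    let left' := if (match msf with | none => false | some mv => decide (mv < x)) then i else left
    let msf' := if (match msf with | none => true | some mv => decide (x < mv)) then some x else msf
    loopB nums i msf' left'

def getMinimumUnsortedLeftIndex_py_alt (nums : List Int) : Int :=
  ((loopB nums nums.length none nums.length : Nat) : Int)

-- ===== PRECONDITION & SPEC =====
def Spec_getMinimumUnsortedLeftIndex_py (nums : List Int) (out : Int) : Prop := out = getMinimumUnsortedLeftIndex_py_alt nums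
instance (nums : List Int) (out : Int) : Decidable (Spec_getMinimumUnsortedLeftIndex_py nums out) := by unfold Spec_getMinimumUnsortedLeftIndex_py; infer_instance

-- ===== CLAIM (what is proved, stated in full; the proofs are below) =====
def Claim_equal_getMinimumUnsortedLeftIndex_py : Prop := ∀ (nums : List Int), Dom_getMinimumUnsortedLeftIndex_py nums → Spec_getMinimumUnsortedLeftIndex_py nums (getMinimumUnsortedLeftIndex_py nums)

-- ===== LEMMAS AND PROOFS =====

-- minimum of a list as an Option (none for [])
def omin : List Int → Option Int
  | [] => none
  | x :: xs => some (match omin xs with | none => x | some m => min x m)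

-- "index i sees a strictly smaller element somewhere to its right"
def Rp (nums : List Int) (i : Nat) : Prop :=
  ∃ m, omin (nums.drop (i + 1)) = some m ∧ m < nums.getD i 0

theorem omin_eq_none {l : List Int} : omin l = none ↔ l = [] := by
  cases l <;> simp [omin]

theorem omin_mem {l : List Int} : ∀ {m : Int}, omin l = some m → m ∈ l := by
  induction l with
  | nil => intro m h; simp [omin] at h
  | cons x xs ih =>
    intro m h
    simp only [omin, Option.some.injEq] at h
    rcases hx : omin xs with - | mm <;> rw [hx] at h
    · have h2 : x = m := h
      simp [h2]
    · have h2 : min x mm = m := h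
      rcases le_total x mm with h1 | h1
      · rw [min_eq_left h1] at h2; simp [h2]
      · rw [min_eq_right h1] at h2
        exact List.mem_cons_of_mem _ (h2 ▸ ih hx)

theorem omin_le {l : List Int} : ∀ {m y : Int}, omin l = some m → y ∈ l → m ≤ y := by
  induction l with
  | nil => intro m y h hy; simp at hy
  | cons x xs ih =>
    intro m y h hy
    simp only [omin, Option.some.injEq] at h
    rcases hx : omin xs with - | mm <;> rw [hx] at h
    · have h2 : x = m := h
      have hxs : xs = [] := omin_eq_none.mp hx
      subst hxs; simp at hy; omega
    · have h2 : min x mm = m := h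
      rcases List.mem_cons.mp hy with rfl | hy'
      · have h4 : min y mm ≤ y := min_le_left _ _
        omega
      · have h3 : mm ≤ y := ih hx hy'
        have : min x mm ≤ mm := min_le_right _ _
        omega

theorem drop_cons_getD {nums : List Int} {k : Nat} (h : k < nums.length) :
    nums.drop k = nums.getD k 0 :: nums.drop (k + 1) := by
  rw [List.drop_eq_getElem_cons h, List.getD_eq_getElem _ _ h]

theorem omin_drop_cons {nums : List Int} {k : Nat} (h : k < nums.length) :
    omin (nums.drop k) =
      some (match omin (nums.drop (k + 1)) with
            | none => nums.getD k 0
            | some m => min (nums.getD k 0) m) := by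
  rw [drop_cons_getD h]; rfl

theorem mem_drop_iff {nums : List Int} {k : Nat} {y : Int} :
    y ∈ nums.drop k ↔ ∃ j, k ≤ j ∧ j < nums.length ∧ nums.getD j 0 = y := by
  constructor
  · intro hy
    rcases List.mem_iff_getElem.mp hy with ⟨jj, hjj, hget⟩
    have hl : jj < nums.length - k := by simpa using hjj
    refine ⟨k + jj, by omega, by omega, ?_⟩
    rw [List.getD_eq_getElem _ _ (by omega)]
    rw [List.getElem_drop] at hget
    exact hget
  · rintro ⟨j, hkj, hjn, rfl⟩
    apply List.mem_iff_getElem.mpr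
    refine ⟨j - k, by rw [List.length_drop]; omega, ?_⟩
    rw [List.getElem_drop]
    rw [List.getD_eq_getElem _ _ hjn]
    congr 1; omega

-- ---- characterization of A's pieces ----

theorem fbA_le (nums : List Int) (j : Nat) : fbA nums j ≤ nums.length := by
  fun_induction fbA with
  | case1 i h hb => omega
  | case2 i h hb ih => exact ih
  | case3 i h => omega

theorem fbA_lt_ge (nums : List Int) (j : Nat) (h : fbA nums j < nums.length) : j ≤ fbA nums j := by
  fun_induction fbA with
  | case1 i hi hb => omega
  | case2 i hi hb ih => have := ih h; omega
  | case3 i hi => omega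

theorem fbA_sorted (nums : List Int) (j : Nat) :
    ∀ i, j ≤ i → i < fbA nums j → nums.getD (i - 1) 0 ≤ nums.getD i 0 := by
  fun_induction fbA with
  | case1 i hi hb => intro i' h1 h2; omega
  | case2 i hi hb ih =>
    intro i' h1 h2
    rcases Nat.eq_or_lt_of_le h1 with rfl | h1'
    · omega
    · exact ih i' (by omega) h2
  | case3 i hi => intro i' h1 h2; omega

theorem fbA_break (nums : List Int) (j : Nat) (h : fbA nums j < nums.length) :
    nums.getD (fbA nums j) 0 < nums.getD (fbA nums j - 1) 0 := by
  fun_induction fbA with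
  | case1 i hi hb => exact hb
  | case2 i hi hb ih => exact ih h
  | case3 i hi => omega

-- nondecreasing chain on the prefix [0, b)
theorem chain_le (nums : List Int) (b : Nat)
    (hs : ∀ i, 1 ≤ i → i < b → nums.getD (i - 1) 0 ≤ nums.getD i 0) :
    ∀ p q, p ≤ q → q < b → nums.getD p 0 ≤ nums.getD q 0 := by
  intro p q
  induction q with
  | zero =>
    intro h1 h2
    have : p = 0 := by omega
    subst this; exact le_refl _
  | succ q ih =>
    intro h1 h2
    rcases Nat.eq_or_lt_of_le h1 with rfl | h1'
    · exact le_refl _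
    · have h3 : nums.getD p 0 ≤ nums.getD q 0 := ih (by omega) (by omega)
      have h4 := hs (q + 1) (by omega) h2
      simp only [Nat.add_sub_cancel] at h4
      omega

-- merge for accumulator semantics of smA
def om2 : Option Int → Option Int → Option Int
  | none, o => o
  | some a, none => some a
  | some a, some b => some (min a b)

theorem smA_eq (nums : List Int) (i : Nat) (acc : Option Int) :
    smA nums i acc = om2 acc (omin (nums.drop i)) := by
  fun_induction smA with
  | case1 i acc hi ih =>
    rw [ih, omin_drop_cons hi]
    rcases acc with - | a <;> rcases hx : omin (nums.drop (i + 1)) with - | mm <;>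
      simp [om2, min_assoc]
  | case2 i acc hi =>
    rw [List.drop_eq_nil_of_le (by omega)]
    rcases acc with - | a <;> simp [om2, omin]

theorem flA_le (nums : List Int) (j : Nat) (m : Option Int) : flA nums j m ≤ nums.length := by
  fun_induction flA with
  | case1 i hi hb => omega
  | case2 i hi hb ih => exact ih
  | case3 i hi => omega

theorem flA_sat (nums : List Int) (j : Nat) (m : Option Int) (h : flA nums j m < nums.length) :
    ∃ v, m = some v ∧ v < nums.getD (flA nums j m) 0 := by
  fun_induction flA with
  | case1 i hi hb =>
    rcases m with - | v
    · simp at hb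
    · simp at hb; exact ⟨v, rfl, hb⟩
  | case2 i hi hb ih => exact ih h
  | case3 i hi => omega

theorem flA_not (nums : List Int) (j : Nat) (m : Option Int) :
    ∀ i, j ≤ i → i < flA nums j m → ∀ v, m = some v → ¬ (v < nums.getD i 0) := by
  fun_induction flA with
  | case1 i hi hb => intro i' h1 h2; omega
  | case2 i hi hb ih =>
    intro i' h1 h2 v hv
    rcases Nat.eq_or_lt_of_le h1 with rfl | h1'
    · subst hv; simp at hb
      rw [List.getD_eq_getElem?_getD]; omega
    · exact ih i' (by omega) h2 v hv
  | case3 i hi => intro i' h1 h2; omega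

-- ---- characterization of B's loop ----

theorem loopB_cond_iff (nums : List Int) (k : Nat) :
    ((match omin (nums.drop (k + 1)) with
      | none => false
      | some mv => decide (mv < nums.getD k 0)) = true) ↔ Rp nums k := by
  rcases hx : omin (nums.drop (k + 1)) with - | mm <;> simp [Rp, hx]

theorem loopB_step (nums : List Int) (k left : Nat) (hkn : k < nums.length) :
    loopB nums (k + 1) (omin (nums.drop (k + 1))) left =
    loopB nums k (omin (nums.drop k))
      (if (match omin (nums.drop (k + 1)) with
           | none => false
           | some mv => decide (mv < nums.getD k 0)) then k else left) := by
  simp only [loopB]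
  congr 1
  rw [omin_drop_cons hkn]
  rcases hx : omin (nums.drop (k + 1)) with - | mm
  · rfl
  · split_ifs with h2
    · have h3 : nums.getD k 0 < mm := by simpa using h2
      show some (nums.getD k 0) = some (min (nums.getD k 0) mm)
      rw [min_eq_left h3.le]
    · have h3 : ¬ nums.getD k 0 < mm := by simpa using h2
      show some mm = some (min (nums.getD k 0) mm)
      rw [min_eq_right (by omega : mm ≤ nums.getD k 0)]

theorem loopB_inv (nums : List Int) :
    ∀ k, k ≤ nums.length → ∀ left, left ≤ nums.length →
    (left < nums.length → Rp nums left) →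
    (∀ i, k ≤ i → i < left → ¬ Rp nums i) →
    (loopB nums k (omin (nums.drop k)) left ≤ nums.length ∧
     (loopB nums k (omin (nums.drop k)) left < nums.length → Rp nums (loopB nums k (omin (nums.drop k)) left)) ∧
     (∀ i, i < loopB nums k (omin (nums.drop k)) left → ¬ Rp nums i)) := by
  intro k
  induction k with
  | zero =>
    intro _ left h1 h2 h3
    simp only [loopB]
    exact ⟨h1, h2, fun i hi => h3 i (by omega) hi⟩
  | succ k ih =>
    intro hk left h1 h2 h3
    have hkn : k < nums.length := by omega
    rw [loopB_step nums k left hkn]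
    by_cases hR : (match omin (nums.drop (k + 1)) with
        | none => false
        | some mv => decide (mv < nums.getD k 0)) = true
    · rw [if_pos hR]
      exact ih (by omega) k (by omega)
        (fun _ => (loopB_cond_iff nums k).mp hR) (fun i hi1 hi2 => by omega)
    · rw [if_neg hR]
      refine ih (by omega) left h1 h2 ?_
      intro i hi1 hi2
      rcases Nat.eq_or_lt_of_le hi1 with rfl | hi1'
      · exact fun hc => hR ((loopB_cond_iff nums _).mpr hc)
      · exact h3 i (by omega) hi2

-- B's result characterized
theorem loopB_char (nums : List Int) :
    loopB nums nums.length none nums.length ≤ nums.length ∧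
    (loopB nums nums.length none nums.length < nums.length → Rp nums (loopB nums nums.length none nums.length)) ∧
    (∀ i, i < loopB nums nums.length none nums.length → ¬ Rp nums i) := by
  have h : omin (nums.drop nums.length) = none := by
    rw [List.drop_length]; rfl
  have hres := loopB_inv nums nums.length (le_refl _) nums.length (le_refl _)
    (fun h => by omega) (fun i h1 h2 => by omega)
  rw [h] at hres
  exact hres

-- main equality on the Nat-valued results of the two loops
theorem main_eq (nums : List Int) :
    flA nums 0 (smA nums (fbA nums 1) none) = loopB nums nums.length none nums.length := by
  have hm : smA nums (fbA nums 1) none = omin (nums.drop (fbA nums 1)) := by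
    rw [smA_eq]; rfl
  have hbn : fbA nums 1 ≤ nums.length := fbA_le nums 1
  obtain ⟨hB1, hB2, hB3⟩ := loopB_char nums
  have hA1 : flA nums 0 (smA nums (fbA nums 1) none) ≤ nums.length :=
    flA_le nums 0 _
  have hsorted := fbA_sorted nums 1
  rcases Nat.lt_or_ge (fbA nums 1) nums.length with hblt | hbge
  · -- a break exists
    have hb1 : 1 ≤ fbA nums 1 := fbA_lt_ge nums 1 hblt
    have hbrk : nums.getD (fbA nums 1) 0 < nums.getD (fbA nums 1 - 1) 0 := fbA_break nums 1 hblt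
    obtain ⟨M, hM⟩ : ∃ M, omin (nums.drop (fbA nums 1)) = some M := by
      rw [omin_drop_cons hblt]; exact ⟨_, rfl⟩
    have hmM : smA nums (fbA nums 1) none = some M := by rw [hm, hM]
    have hMb : M ≤ nums.getD (fbA nums 1) 0 :=
      omin_le hM (mem_drop_iff.mpr ⟨fbA nums 1, le_refl _, hblt, rfl⟩)
    have hQb1 : M < nums.getD (fbA nums 1 - 1) 0 := by omega
    have hrAle : flA nums 0 (smA nums (fbA nums 1) none) ≤ fbA nums 1 - 1 := by
      by_contra hcon
      exact flA_not nums 0 _ (fbA nums 1 - 1) (by omega) (by omega) M hmM hQb1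
    have hrAn : flA nums 0 (smA nums (fbA nums 1) none) < nums.length := by omega
    obtain ⟨v, hv, hvlt⟩ := flA_sat nums 0 _ hrAn
    have hvM : v = M := by
      rw [hmM] at hv
      exact (Option.some.inj hv).symm
    subst hvM
    have hbelow : ∀ i, i < flA nums 0 (smA nums (fbA nums 1) none) → nums.getD i 0 ≤ v := by
      intro i hi
      have := flA_not nums 0 _ i (by omega) hi v hmM
      omega
    have hRrA : Rp nums (flA nums 0 (smA nums (fbA nums 1) none)) := by
      have hMin : v ∈ nums.drop (flA nums 0 (smA nums (fbA nums 1) none) + 1) :=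
        mem_drop_iff.mpr (by
          rcases mem_drop_iff.mp (omin_mem hM) with ⟨j, hj1, hj2, hj3⟩
          exact ⟨j, by omega, hj2, hj3⟩)
      obtain ⟨mm, hmm⟩ : ∃ mm, omin (nums.drop (flA nums 0 (smA nums (fbA nums 1) none) + 1)) = some mm := by
        rw [omin_drop_cons (show flA nums 0 (smA nums (fbA nums 1) none) + 1 < nums.length by omega)]
        exact ⟨_, rfl⟩
      exact ⟨mm, hmm, lt_of_le_of_lt (omin_le hmm hMin) hvlt⟩
    have hnoR : ∀ i, i < flA nums 0 (smA nums (fbA nums 1) none) → ¬ Rp nums i := by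
      rintro i hi ⟨mm, hmm, hmlt⟩
      rcases mem_drop_iff.mp (omin_mem hmm) with ⟨j, hj1, hj2, hj3⟩
      rcases Nat.lt_or_ge j (fbA nums 1) with hjb | hjb
      · have := chain_le nums (fbA nums 1) (fun i' h1 h2 => hsorted i' h1 h2) i j (by omega) hjb
        omega
      · have hMj : v ≤ nums.getD j 0 :=
          omin_le hM (mem_drop_iff.mpr ⟨j, hjb, hj2, rfl⟩)
        have := hbelow i hi
        omega
    rcases Nat.lt_trichotomy (flA nums 0 (smA nums (fbA nums 1) none)) (loopB nums nums.length none nums.length) with h | h | h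
    · exact absurd hRrA (hB3 _ h)
    · exact h
    · exact absurd (hB2 (by omega)) (hnoR _ h)
  · -- no break: whole list nondecreasing, both return len(nums)
    have hmn : smA nums (fbA nums 1) none = none := by
      rw [hm, List.drop_eq_nil_of_le hbge]; rfl
    have hrAn : flA nums 0 (smA nums (fbA nums 1) none) = nums.length := by
      rcases Nat.lt_or_ge (flA nums 0 (smA nums (fbA nums 1) none)) nums.length with h | h
      · obtain ⟨v, hv, -⟩ := flA_sat nums 0 _ h
        rw [hmn] at hv
        exact absurd hv (by simp)
      · omega
    have hnoR : ∀ i, i < nums.length → ¬ Rp nums i := by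
      rintro i hi ⟨mm, hmm, hmlt⟩
      rcases mem_drop_iff.mp (omin_mem hmm) with ⟨j, hj1, hj2, hj3⟩
      have := chain_le nums (fbA nums 1) (fun i' h1 h2 => hsorted i' h1 h2) i j (by omega) (by omega)
      omega
    have hrBn : loopB nums nums.length none nums.length = nums.length := by
      rcases Nat.lt_or_ge (loopB nums nums.length none nums.length) nums.length with h | h
      · exact absurd (hB2 h) (hnoR _ h)
      · omega
    omega

-- ===== VERDICT (by name: the statement is the Claim_ definition above) =====
theorem getMinimumUnsortedLeftIndex_py_spec : Claim_equal_getMinimumUnsortedLeftIndex_py := by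
  intro nums _
  unfold Spec_getMinimumUnsortedLeftIndex_py getMinimumUnsortedLeftIndex_py getMinimumUnsortedLeftIndex_py_alt
  exact congrArg (fun x : Nat => (x : Int)) (main_eq nums)
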